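-- pv_equiv track=rewrite | github.com/Charlex123/tova | tova_core/agents/order_agent.py | _determine_action
-- ===== SOURCE A (Python) =====
-- def _determine_action(tools_used: list[str], reply: str) -> str | None:
--     """Determine the action type from the tools used and reply content."""
--     reply_lower = reply.lower()
--
--     # Insufficient balance
--     if "insufficient" in reply_lower or "top up" in reply_lower or "shortfall" in reply_lower:
--         if any(t in tools_used for t in ["check_balance", "book_appointment", "create_order"]):
--             return "insufficient_balance"
--
--     # Write actions
--     if "create_order" in tools_used:
--         return "order_created"
--     if "cancel_order" in tools_used:
--         return "order_cancelled"
--     if "execute_order" in tools_used: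
--         return "order_executed"
--     if "book_appointment" in tools_used:
--         return "appointment_booked"
--     if "cancel_appointment" in tools_used:
--         return "appointment_cancelled"
--
--     # Search actions
--     if "search_products" in tools_used:
--         return "product_results"
--     if "search_services" in tools_used:
--         return "service_results"
--     if "search_practitioners" in tools_used:
--         return "practitioner_results"
--
--     # Read actions
--     if "get_order_history" in tools_used:
--         return "order_history"
--     if "get_appointment_history" in tools_used:
--         return "appointment_history"
--     if "check_balance" in tools_used:
--         return "balance_check"
--     if "check_drug_safety" in tools_used:
--         return "drug_safety"
--
--     # Conversational
--     if any(q in reply_lower for q in ["confirm", "proceed", "shall i", "would you like me to"]):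
--         return "confirmation_needed"
--     if "?" in reply:
--         return "info_needed"
--     return None
-- ===== SOURCE B (Python) =====
-- # Single pass over tools_used: rank each tool once and keep the minimum-priority hit,
-- # instead of testing the rule chain against the tool list rule by rule.
-- _RULES = [
--     ("create_order", "order_created"),
--     ("cancel_order", "order_cancelled"),
--     ("execute_order", "order_executed"),
--     ("book_appointment", "appointment_booked"),
--     ("cancel_appointment", "appointment_cancelled"),
--     ("search_products", "product_results"),
--     ("search_services", "service_results"),
--     ("search_practitioners", "practitioner_results"),
--     ("get_order_history", "order_history"),
--     ("get_appointment_history", "appointment_history"),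
--     ("check_balance", "balance_check"),
--     ("check_drug_safety", "drug_safety"),
-- ]
-- _BALANCE_TOOLS = ("check_balance", "book_appointment", "create_order")
--
--
-- def _rank(tool):
--     """(priority, action) of a recognised tool, else None."""
--     for i, (name, action) in enumerate(_RULES):
--         if name == tool:
--             return (i, action)
--     return None
--
--
-- def _determine_action(tools_used: list[str], reply: str) -> str | None:
--     reply_lower = reply.lower()
--     best = None           # minimum-priority (priority, action) seen so far
--     balance_tool = False
--     for t in tools_used:
--         hit = _rank(t)
--         if hit is not None and (best is None or hit[0] < best[0]):
--             best = hit
--         if t in _BALANCE_TOOLS: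
--             balance_tool = True
--     if balance_tool and any(k in reply_lower for k in ("insufficient", "top up", "shortfall")):
--         return "insufficient_balance"
--     if best is not None:
--         return best[1]
--     if any(q in reply_lower for q in ("confirm", "proceed", "shall i", "would you like me to")):
--         return "confirmation_needed"
--     return "info_needed" if "?" in reply else None
-- ===== Notes on version B (the rewrite author's own statement) =====
-- stated objective: alternative
-- what changed: Instead of testing A's dozen hard-coded rules one by one against the tool list, B makes a single pass over tools_used, ranking each tool by a priority lookup and keeping the minimum-priority hit (also accumulating the balance-tool flag in the same pass); the result is the same because the first rule whose tool occurs equals the minimum-priority tool present.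
import Mathlib
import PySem

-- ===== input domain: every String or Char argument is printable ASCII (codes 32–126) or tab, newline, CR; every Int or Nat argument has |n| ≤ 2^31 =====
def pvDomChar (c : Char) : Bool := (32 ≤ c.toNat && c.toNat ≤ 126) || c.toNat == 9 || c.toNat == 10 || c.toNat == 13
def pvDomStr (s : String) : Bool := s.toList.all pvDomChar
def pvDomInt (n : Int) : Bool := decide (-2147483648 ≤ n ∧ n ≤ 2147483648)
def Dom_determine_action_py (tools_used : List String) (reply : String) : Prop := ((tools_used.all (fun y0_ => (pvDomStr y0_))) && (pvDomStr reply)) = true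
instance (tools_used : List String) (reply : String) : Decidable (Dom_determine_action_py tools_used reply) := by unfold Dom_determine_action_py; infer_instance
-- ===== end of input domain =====

-- B classifies by a single pass over tools_used, ranking each tool once and keeping the
-- minimum-priority hit, instead of A's fixed chain of per-rule membership tests (alternative).

-- ===== PORT A =====
def determine_action_py (tools_used : List String) (reply : String) : Option String :=
  let reply_lower := PySem.Str.lower reply
  if (PySem.Str.isIn "insufficient" reply_lower || PySem.Str.isIn "top up" reply_lower
      || PySem.Str.isIn "shortfall" reply_lower)
     && (["check_balance", "book_appointment", "create_order"].any
          (fun t => tools_used.contains t)) then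
    some "insufficient_balance"
  else if tools_used.contains "create_order" then some "order_created"
  else if tools_used.contains "cancel_order" then some "order_cancelled"
  else if tools_used.contains "execute_order" then some "order_executed"
  else if tools_used.contains "book_appointment" then some "appointment_booked"
  else if tools_used.contains "cancel_appointment" then some "appointment_cancelled"
  else if tools_used.contains "search_products" then some "product_results"
  else if tools_used.contains "search_services" then some "service_results"
  else if tools_used.contains "search_practitioners" then some "practitioner_results"
  else if tools_used.contains "get_order_history" then some "order_history"
  else if tools_used.contains "get_appointment_history" then some "appointment_history"
  else if tools_used.contains "check_balance" then some "balance_check"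
  else if tools_used.contains "check_drug_safety" then some "drug_safety"
  else if (["confirm", "proceed", "shall i", "would you like me to"].any
            (fun q => PySem.Str.isIn q reply_lower)) then
    some "confirmation_needed"
  else if PySem.Str.isIn "?" reply then some "info_needed"
  else none

-- ===== PORT B =====
def pvRules : List (String × String) :=
  [("create_order", "order_created"),
   ("cancel_order", "order_cancelled"),
   ("execute_order", "order_executed"),
   ("book_appointment", "appointment_booked"),
   ("cancel_appointment", "appointment_cancelled"),
   ("search_products", "product_results"),
   ("search_services", "service_results"),
   ("search_practitioners", "practitioner_results"),
   ("get_order_history", "order_history"),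
   ("get_appointment_history", "appointment_history"),
   ("check_balance", "balance_check"),
   ("check_drug_safety", "drug_safety")]

-- _rank: first-match scan over enumerate(_RULES)
def pvRank (tool : String) : Option (Int × String) :=
  match (PySem.List.enumerate pvRules 0).find? (fun p => p.2.1 == tool) with
  | some p => some (p.1, p.2.2)
  | none => none

-- one loop iteration of B: update the minimum-priority hit and the balance flag
def pvStep (best : Option (Int × String)) (t : String) : Option (Int × String) :=
  match pvRank t with
  | none => best
  | some hit =>
    match best with
    | none => some hit
    | some b => if hit.1 < b.1 then some hit else some b

def pvBal (t : String) : Bool :=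
  t == "check_balance" || t == "book_appointment" || t == "create_order"

def determine_action_py_alt (tools_used : List String) (reply : String) : Option String :=
  let reply_lower := PySem.Str.lower reply
  let st := tools_used.foldl (fun s t => (pvStep s.1 t, s.2 || pvBal t))
              ((none : Option (Int × String)), false)
  if st.2 && (["insufficient", "top up", "shortfall"].any
               (fun k => PySem.Str.isIn k reply_lower)) then
    some "insufficient_balance"
  else
    match st.1 with
    | some b => some b.2
    | none =>
      if (["confirm", "proceed", "shall i", "would you like me to"].any
           (fun q => PySem.Str.isIn q reply_lower)) then
        some "confirmation_needed"
      else if PySem.Str.isIn "?" reply then some "info_needed"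
      else none

-- ===== PRECONDITION & SPEC =====
def Spec_determine_action_py (tools_used : List String) (reply : String) (out : Option String) : Prop := out = determine_action_py_alt tools_used reply
instance (tools_used : List String) (reply : String) (out : Option String) : Decidable (Spec_determine_action_py tools_used reply out) := by unfold Spec_determine_action_py; infer_instance

-- ===== CLAIM (what is proved, stated in full; the proofs are below) =====
def Claim_equal_determine_action_py : Prop := ∀ (tools_used : List String) (reply : String), Dom_determine_action_py tools_used reply → Spec_determine_action_py tools_used reply (determine_action_py tools_used reply)

-- ===== LEMMAS AND PROOFS =====

-- left-biased minimum on (Int × _) by first component, none = identity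
def pvMin (a b : Option (Int × String)) : Option (Int × String) :=
  match a, b with
  | none, b => b
  | a, none => a
  | some p, some q => if q.1 < p.1 then some q else some p

theorem pvStep_eq_min (b : Option (Int × String)) (t : String) :
    pvStep b t = pvMin b (pvRank t) := by
  unfold pvStep pvMin
  rcases pvRank t with _ | h <;> rcases b with _ | p <;> rfl

theorem pvMin_assoc (a b c : Option (Int × String)) :
    pvMin (pvMin a b) c = pvMin a (pvMin b c) := by
  rcases a with _ | p <;> rcases b with _ | q <;> rcases c with _ | r <;> try rfl
  all_goals simp only [pvMin]
  all_goals (try split_ifs) <;> (try (simp only [pvMin])) <;> (try split_ifs) <;>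
    first | rfl | (exfalso; omega)

theorem pv_fold_acc (ts : List String) (b : Option (Int × String)) :
    ts.foldl (fun s t => pvMin s (pvRank t)) b
      = pvMin b (ts.foldl (fun s t => pvMin s (pvRank t)) none) := by
  induction ts generalizing b with
  | nil => rcases b with _ | p <;> rfl
  | cons t ts ih =>
    simp only [List.foldl_cons]
    rw [ih (pvMin b (pvRank t)), ih (pvMin none (pvRank t)), pvMin_assoc]
    rfl

-- first match under P-or-Q on an index-increasing list is the minimum of the two first matches
theorem pv_min_find (E : List (Int × String × String))
    (hE : E.Pairwise (fun a b => a.1 < b.1)) (P Q : Int × String × String → Bool) :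
    pvMin ((E.find? P).map (fun p => (p.1, p.2.2)))
          ((E.find? Q).map (fun p => (p.1, p.2.2)))
      = (E.find? (fun p => P p || Q p)).map (fun p => (p.1, p.2.2)) := by
  induction E with
  | nil => rfl
  | cons e E ih =>
    rcases List.pairwise_cons.mp hE with ⟨h1, hE'⟩
    cases hP : P e <;> cases hQ : Q e <;>
      simp only [List.find?_cons, hP, hQ, Bool.or_self, Bool.or_true, Bool.true_or,
        Option.map_some]
    · exact ih hE'
    · -- P e = false, Q e = true
      cases hF : E.find? P with
      | none => rfl
      | some x =>
        have hx : e.1 < x.1 := h1 x (List.mem_of_find?_eq_some hF)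
        simp only [Option.map_some, pvMin, if_pos hx]
    · -- P e = true, Q e = false
      cases hF : E.find? Q with
      | none => rfl
      | some x =>
        have hx : e.1 < x.1 := h1 x (List.mem_of_find?_eq_some hF)
        simp only [Option.map_some, pvMin]
        rw [if_neg (by omega)]
    · -- both true
      simp only [pvMin]
      rw [if_neg (by omega)]

theorem pvRank_eq (t : String) :
    pvRank t = ((PySem.List.enumerate pvRules 0).find? (fun p => p.2.1 == t)).map
      (fun p => (p.1, p.2.2)) := by
  unfold pvRank
  cases (PySem.List.enumerate pvRules 0).find? (fun p => p.2.1 == t) <;> rfl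

-- the min-accumulator pass equals the first rule (in rule order) whose tool occurs in ts
theorem pv_best_char (ts : List String) :
    ts.foldl (fun s t => pvMin s (pvRank t)) none
      = ((PySem.List.enumerate pvRules 0).find? (fun p => ts.contains p.2.1)).map
          (fun p => (p.1, p.2.2)) := by
  induction ts with
  | nil => simp [List.find?_eq_none]
  | cons t ts ih =>
    simp only [List.foldl_cons]
    rw [pv_fold_acc, ih]
    have h1 : pvMin none (pvRank t) = pvRank t := by
      cases pvRank t <;> rfl
    rw [h1, pvRank_eq,
      pv_min_find _ (PySem.List.pairwise_lt_enumerate pvRules 0)]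
    congr 1

-- a Bool-accumulating or-loop is start || any
theorem pv_fold_or (ts : List String) (p : String → Bool) (f : Bool) :
    ts.foldl (fun x t => x || p t) f = (f || ts.any p) := by
  induction ts generalizing f with
  | nil => simp
  | cons t ts ih => simp [ih, Bool.or_assoc]

-- the balance-flag test equals the three membership tests of A's guard
theorem pv_any_bal (ts : List String) :
    ts.any pvBal = (ts.contains "check_balance" || ts.contains "book_appointment"
                    || ts.contains "create_order") := by
  induction ts with
  | nil => rfl
  | cons t ts ih =>
    rw [Bool.eq_iff_iff]
    simp [List.any_cons, ih, pvBal, List.mem_cons]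
    tauto

-- the pair fold splits into its two independent components
theorem pv_fold_pair (ts : List String) (b : Option (Int × String)) (f : Bool) :
    ts.foldl (fun s t => (pvStep s.1 t, s.2 || pvBal t)) (b, f)
      = (ts.foldl pvStep b, ts.foldl (fun x t => x || pvBal t) f) := by
  induction ts generalizing b f with
  | nil => rfl
  | cons t ts ih => simp only [List.foldl_cons, ih]

-- the first match over the enumerated rule table, unrolled to A's condition chain
theorem pv_find_chain (ts : List String) :
    ((PySem.List.enumerate pvRules 0).find? (fun p => ts.contains p.2.1)).map
        (fun p => (p.1, p.2.2))
    = (if ts.contains "create_order" = true then some ((0 : Int), "order_created")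
       else if ts.contains "cancel_order" = true then some ((1 : Int), "order_cancelled")
       else if ts.contains "execute_order" = true then some ((2 : Int), "order_executed")
       else if ts.contains "book_appointment" = true then some ((3 : Int), "appointment_booked")
       else if ts.contains "cancel_appointment" = true then some ((4 : Int), "appointment_cancelled")
       else if ts.contains "search_products" = true then some ((5 : Int), "product_results")
       else if ts.contains "search_services" = true then some ((6 : Int), "service_results")
       else if ts.contains "search_practitioners" = true then some ((7 : Int), "practitioner_results")
       else if ts.contains "get_order_history" = true then some ((8 : Int), "order_history")
       else if ts.contains "get_appointment_history" = true then some ((9 : Int), "appointment_history")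
       else if ts.contains "check_balance" = true then some ((10 : Int), "balance_check")
       else if ts.contains "check_drug_safety" = true then some ((11 : Int), "drug_safety")
       else none) := by
  simp only [pvRules, PySem.List.enumerate_cons, PySem.List.enumerate_nil, List.find?_cons]
  cases _h0 : ts.contains "create_order"
  case true => simp only [if_true]; rfl
  case false =>
    simp only [Bool.false_eq_true, if_false]
    cases _h1 : ts.contains "cancel_order"
    case true => simp only [if_true]; rfl
    case false =>
      simp only [Bool.false_eq_true, if_false]
      cases _h2 : ts.contains "execute_order"
      case true => simp only [if_true]; rfl
      case false =>
        simp only [Bool.false_eq_true, if_false]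
        cases _h3 : ts.contains "book_appointment"
        case true => simp only [if_true]; rfl
        case false =>
          simp only [Bool.false_eq_true, if_false]
          cases _h4 : ts.contains "cancel_appointment"
          case true => simp only [if_true]; rfl
          case false =>
            simp only [Bool.false_eq_true, if_false]
            cases _h5 : ts.contains "search_products"
            case true => simp only [if_true]; rfl
            case false =>
              simp only [Bool.false_eq_true, if_false]
              cases _h6 : ts.contains "search_services"
              case true => simp only [if_true]; rfl
              case false =>
                simp only [Bool.false_eq_true, if_false]
                cases _h7 : ts.contains "search_practitioners"
                case true => simp only [if_true]; rfl
                case false =>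
                  simp only [Bool.false_eq_true, if_false]
                  cases _h8 : ts.contains "get_order_history"
                  case true => simp only [if_true]; rfl
                  case false =>
                    simp only [Bool.false_eq_true, if_false]
                    cases _h9 : ts.contains "get_appointment_history"
                    case true => simp only [if_true]; rfl
                    case false =>
                      simp only [Bool.false_eq_true, if_false]
                      cases _h10 : ts.contains "check_balance"
                      case true => simp only [if_true]; rfl
                      case false =>
                        simp only [Bool.false_eq_true, if_false]
                        cases _h11 : ts.contains "check_drug_safety"
                        case true => simp only [if_true]; rfl
                        case false => simp only [Bool.false_eq_true, if_false]; rfl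

-- ===== VERDICT (by name: the statement is the Claim_ definition above) =====
set_option maxHeartbeats 2000000 in
theorem determine_action_py_spec : Claim_equal_determine_action_py := by
  intro tools_used reply _
  unfold Spec_determine_action_py determine_action_py determine_action_py_alt
  rw [pv_fold_pair,
    show pvStep = (fun s t => pvMin s (pvRank t)) from
      funext fun s => funext fun t => pvStep_eq_min s t,
    pv_best_char, pv_fold_or, Bool.false_or, pv_any_bal, pv_find_chain]
  simp only [List.any_cons, List.any_nil, Bool.or_false]
  rw [Bool.and_comm]
  simp only [Bool.or_assoc]
  cases _hH : ((tools_used.contains "check_balance" ||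
      (tools_used.contains "book_appointment" || tools_used.contains "create_order")) &&
      (PySem.Str.isIn "insufficient" (PySem.Str.lower reply) ||
        (PySem.Str.isIn "top up" (PySem.Str.lower reply) ||
         PySem.Str.isIn "shortfall" (PySem.Str.lower reply))))
  case true => simp only [if_true]
  case false =>
    simp only [Bool.false_eq_true, if_false]
    cases _h0 : tools_used.contains "create_order"
    case true => simp only [if_true]
    case false =>
      simp only [Bool.false_eq_true, if_false]
      cases _h1 : tools_used.contains "cancel_order"
      case true => simp only [if_true]
      case false =>
        simp only [Bool.false_eq_true, if_false]
        cases _h2 : tools_used.contains "execute_order"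
        case true => simp only [if_true]
        case false =>
          simp only [Bool.false_eq_true, if_false]
          cases _h3 : tools_used.contains "book_appointment"
          case true => simp only [if_true]
          case false =>
            simp only [Bool.false_eq_true, if_false]
            cases _h4 : tools_used.contains "cancel_appointment"
            case true => simp only [if_true]
            case false =>
              simp only [Bool.false_eq_true, if_false]
              cases _h5 : tools_used.contains "search_products"
              case true => simp only [if_true]
              case false =>
                simp only [Bool.false_eq_true, if_false]
                cases _h6 : tools_used.contains "search_services"
                case true => simp only [if_true]
                case false =>
                  simp only [Bool.false_eq_true, if_false]
                  cases _h7 : tools_used.contains "search_practitioners"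
                  case true => simp only [if_true]
                  case false =>
                    simp only [Bool.false_eq_true, if_false]
                    cases _h8 : tools_used.contains "get_order_history"
                    case true => simp only [if_true]
                    case false =>
                      simp only [Bool.false_eq_true, if_false]
                      cases _h9 : tools_used.contains "get_appointment_history"
                      case true => simp only [if_true]
                      case false =>
                        simp only [Bool.false_eq_true, if_false]
                        cases _h10 : tools_used.contains "check_balance"
                        case true => simp only [if_true]
                        case false =>
                          simp only [Bool.false_eq_true, if_false]
                          cases _h11 : tools_used.contains "check_drug_safety"
                          case true => simp only [if_true]
                          case false => simp only [Bool.false_eq_true, if_false]
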